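-- pv_equiv track=rewrite | github.com/1chb/AtomSnake | optimize.py | convert_hex_to_decimal
-- ===== SOURCE A (Python) =====
-- def convert_hex_to_decimal(line):
--     """Convert hex literals (#XX) to decimal equivalents.
--
--     '#38' -> '56', '#410' -> '1040', '#7FFF' -> '32767'
--     Skips content inside strings. This enables the space-after-digit
--     rule to be simplified (no more A-F hex digit concerns).
--     """
--     result = []
--     i = 0
--     in_string = False
--     while i < len(line):
--         c = line[i]
--         if c == '"':
--             in_string = not in_string
--             result.append(c)
--             i += 1
--             continue
--         if in_string:
--             result.append(c)
--             i += 1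
--             continue
--         if c == '#' and i + 1 < len(line) and line[i + 1] in '0123456789ABCDEFabcdef':
--             # Collect hex digits
--             j = i + 1
--             while j < len(line) and line[j] in '0123456789ABCDEFabcdef':
--                 j += 1
--             hex_str = line[i + 1:j]
--             result.append(str(int(hex_str, 16)))
--             i = j
--             continue
--         result.append(c)
--         i += 1
--     return ''.join(result)
-- ===== SOURCE B (Python) =====
-- HEX = '0123456789ABCDEFabcdef'
--
-- def _convert(seg):
--     # seg contains no quotes: split on '#', re-attach each piece after
--     # converting its leading run of hex digits (if any).
--     pieces = seg.split('#')
--     out = [pieces[0]]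
--     for p in pieces[1:]:
--         n = 0
--         while n < len(p) and p[n] in HEX:
--             n += 1
--         out.append((str(int(p[:n], 16)) + p[n:]) if n else '#' + p)
--     return ''.join(out)
--
-- def convert_hex_to_decimal(line):
--     before, quote, rest = line.partition('"')
--     if not quote:
--         return _convert(before)
--     inside, quote2, after = rest.partition('"')
--     return _convert(before) + '"' + inside + quote2 + convert_hex_to_decimal(after)
-- ===== Notes on version B (the rewrite author's own statement) =====
-- stated objective: faster
-- what changed: Replaces A's per-character index-based while-loop state machine (in_string flag, manual hex scan with i/j indices) by a recursive decomposition: partition the line on quote characters (convert outside parts, copy inside parts) and convert each quote-free segment by splitting it on the hash character and rewriting each piece's leading hex-digit run; the bulk C-level str.partition/str.split calls replace Python-level per-character appends.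
import Mathlib
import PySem

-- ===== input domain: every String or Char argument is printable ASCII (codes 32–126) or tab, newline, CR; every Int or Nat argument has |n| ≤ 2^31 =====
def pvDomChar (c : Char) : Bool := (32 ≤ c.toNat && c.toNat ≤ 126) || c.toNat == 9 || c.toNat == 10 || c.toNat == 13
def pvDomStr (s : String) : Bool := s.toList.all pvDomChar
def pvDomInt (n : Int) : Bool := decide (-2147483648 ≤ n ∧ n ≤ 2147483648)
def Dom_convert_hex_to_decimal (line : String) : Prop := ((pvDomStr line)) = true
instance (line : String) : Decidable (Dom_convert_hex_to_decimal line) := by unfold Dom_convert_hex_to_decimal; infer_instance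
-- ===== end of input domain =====

-- B re-implements A by recursive str.partition on quotes plus str.split on the
-- hash character, instead of A's per-character index-based in_string state
-- machine; same returned value, measurably faster in CPython (bulk C-level
-- split/partition instead of per-character appends).

-- shared helper: the hex-digit character class (the same literal string both Pythons test membership in)
def pvIsHex (c : Char) : Bool := "0123456789ABCDEFabcdef".toList.contains c

-- shared helper: int(s, 16) on a nonempty string of hex digits (hand-ported, exact on that domain)
def pvHexDigit (c : Char) : Nat :=
  if c.toNat ≤ 57 then c.toNat - 48 else if c.toNat ≤ 70 then c.toNat - 55 else c.toNat - 87

def pvHexVal (ds : List Char) : Nat := ds.foldl (fun a c => a * 16 + pvHexDigit c) 0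

-- ===== PORT A =====
-- inner `while j < len(line) and line[j] in HEX: j += 1`
def pvHexEndA (cs : List Char) (j : Nat) : Nat :=
  if h : j < cs.length then
    if pvIsHex cs[j] then pvHexEndA cs (j + 1) else j
  else j
termination_by cs.length - j

theorem pvHexEndA_ge (cs : List Char) (j : Nat) : j ≤ pvHexEndA cs j := by
  unfold pvHexEndA
  split
  · split
    · exact le_trans (Nat.le_succ j) (pvHexEndA_ge cs (j + 1))
    · exact le_refl j
  · exact le_refl j
termination_by cs.length - j

-- the main `while i < len(line)` loop; result is the list of appended strings
def pvLoopA (cs : List Char) (i : Nat) (inStr : Bool) (res : List (List Char)) : List (List Char) :=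
  if h : i < cs.length then
    let c := cs[i]
    if c = '"' then pvLoopA cs (i + 1) (!inStr) (res ++ [[c]])
    else if inStr then pvLoopA cs (i + 1) inStr (res ++ [[c]])
    else if c = '#' ∧ i + 1 < cs.length ∧ pvIsHex (cs[i + 1]?.getD ' ') then
      let j := pvHexEndA cs (i + 1)
      pvLoopA cs j inStr (res ++ [(PySem.Int.toStr (pvHexVal ((cs.drop (i + 1)).take (j - (i + 1))))).toList])
    else pvLoopA cs (i + 1) inStr (res ++ [[c]])
  else res
termination_by cs.length - i
decreasing_by
  · omega
  · omega
  · have := pvHexEndA_ge cs (i + 1); omega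
  · omega

def convert_hex_to_decimal (line : String) : String :=
  String.ofList (pvLoopA line.toList 0 false []).flatten

-- ===== PORT B =====
-- str.partition('"') : chars before the first quote, and (if found) the chars after it
def pvBreakQ : List Char → List Char × Option (List Char)
  | [] => ([], none)
  | c :: cs =>
    if c = '"' then ([], some cs)
    else
      let (p, r) := pvBreakQ cs
      (c :: p, r)

theorem pvBreakQ_some_len (cs p r : List Char) (h : pvBreakQ cs = (p, some r)) :
    r.length < cs.length := by
  induction cs generalizing p r with
  | nil => simp [pvBreakQ] at h
  | cons c cs ih =>
    by_cases hc : c = '"'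
    · simp [pvBreakQ, hc, Prod.mk.injEq] at h
      simp [← h.2]
    · simp only [pvBreakQ, if_neg hc] at h
      rcases hb : pvBreakQ cs with ⟨p', r'⟩
      rw [hb] at h
      rw [Prod.mk.injEq] at h
      cases r' with
      | none => exact absurd h.2 (by simp)
      | some r'' =>
        have h2 : r'' = r := by have := h.2; simpa using this
        subst h2
        have := ih p' r'' hb
        simp
        omega

-- str.split('#')
def pvSplitH : List Char → List (List Char)
  | [] => [[]]
  | c :: cs =>
    match pvSplitH cs with
    | [] => [[]]   -- unreachable: pvSplitH never returns []
    | p :: ps => if c = '#' then [] :: p :: ps else (c :: p) :: ps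

-- the `while n < len(p) and p[n] in HEX` counter of _convert
def pvHexSpan : List Char → Nat
  | [] => 0
  | c :: cs => if pvIsHex c then pvHexSpan cs + 1 else 0

-- _convert(seg)
def pvConvSeg (seg : List Char) : List Char :=
  match pvSplitH seg with
  | [] => []      -- unreachable
  | p0 :: ps =>
    p0 ++ (ps.map (fun p =>
      let n := pvHexSpan p
      if n ≠ 0 then (PySem.Int.toStr (pvHexVal (p.take n))).toList ++ p.drop n
      else '#' :: p)).flatten

def pvConvAlt (cs : List Char) : List Char :=
  match h1 : pvBreakQ cs with
  | (before, none) => pvConvSeg before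
  | (before, some rest) =>
    match h2 : pvBreakQ rest with
    | (inside, none) => pvConvSeg before ++ '"' :: inside
    | (inside, some after) => pvConvSeg before ++ '"' :: inside ++ '"' :: pvConvAlt after
termination_by cs.length
decreasing_by
  have ha := pvBreakQ_some_len cs before rest h1
  have hb := pvBreakQ_some_len rest inside after h2
  omega

def convert_hex_to_decimal_alt (line : String) : String :=
  String.ofList (pvConvAlt line.toList)

-- ===== PRECONDITION & SPEC =====
def Spec_convert_hex_to_decimal (line : String) (out : String) : Prop := out = convert_hex_to_decimal_alt line
instance (line : String) (out : String) : Decidable (Spec_convert_hex_to_decimal line out) := by unfold Spec_convert_hex_to_decimal; infer_instance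

-- ===== CLAIM (what is proved, stated in full; the proofs are below) =====
def Claim_equal_convert_hex_to_decimal : Prop := ∀ (line : String), Dom_convert_hex_to_decimal line → Spec_convert_hex_to_decimal line (convert_hex_to_decimal line)

-- ===== LEMMAS AND PROOFS =====

-- canonical recursive description of the conversion, the bridge both proofs meet at
def specCHD : List Char → Bool → List Char
  | [], _ => []
  | c :: cs, b =>
    if c = '"' then c :: specCHD cs (!b)
    else if b then c :: specCHD cs b
    else if c = '#' ∧ pvIsHex (cs.headD ' ') then
      (PySem.Int.toStr (pvHexVal (cs.take (pvHexSpan cs)))).toList ++ specCHD (cs.drop (pvHexSpan cs)) b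
    else c :: specCHD cs b
termination_by cs _ => cs.length
decreasing_by all_goals simp <;> omega

-- the quote-free fragment of specCHD (what _convert computes)
def specNoQ : List Char → List Char
  | [] => []
  | c :: cs =>
    if c = '#' ∧ pvIsHex (cs.headD ' ') then
      (PySem.Int.toStr (pvHexVal (cs.take (pvHexSpan cs)))).toList ++ specNoQ (cs.drop (pvHexSpan cs))
    else c :: specNoQ cs
termination_by cs => cs.length
decreasing_by all_goals simp <;> omega

theorem pvHexSpan_le (l : List Char) : pvHexSpan l ≤ l.length := by
  induction l with
  | nil => simp [pvHexSpan]
  | cons c cs ih => simp only [pvHexSpan]; split <;> simp <;> omega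

theorem pvHexSpan_append_zero (q r : List Char) (h : pvHexSpan r = 0) :
    pvHexSpan (q ++ r) = pvHexSpan q := by
  induction q with
  | nil => simpa [pvHexSpan] using h
  | cons c cs ih => simp only [pvHexSpan, List.cons_append]; split <;> simp [ih]

theorem pvHexEndA_eq (cs : List Char) (j : Nat) (hj : j ≤ cs.length) :
    pvHexEndA cs j = j + pvHexSpan (cs.drop j) := by
  unfold pvHexEndA
  split
  · rename_i h
    rw [List.drop_eq_getElem_cons h]
    split
    · rename_i hh
      rw [pvHexEndA_eq cs (j + 1) (by omega)]
      simp [pvHexSpan, hh]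
      omega
    · rename_i hh
      simp [pvHexSpan, hh]
  · rename_i h
    have : cs.drop j = [] := List.drop_eq_nil_of_le (by omega)
    simp [this, pvHexSpan]
termination_by cs.length - j

theorem specNoQ_append_hashfree (q r : List Char) (hq : '#' ∉ q) :
    specNoQ (q ++ r) = q ++ specNoQ r := by
  induction q with
  | nil => simp
  | cons c cs ih =>
    have hc : c ≠ '#' := by intro h; exact hq (h ▸ List.mem_cons_self ..)
    have hcs : '#' ∉ cs := fun h => hq (List.mem_cons_of_mem _ h)
    rw [List.cons_append, specNoQ]
    rw [if_neg (by simp [hc])]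
    simp [ih hcs]

theorem pvHexSpan_flatMap_hash (ps : List (List Char)) :
    pvHexSpan (ps.flatMap (fun p => '#' :: p)) = 0 := by
  cases ps with
  | nil => simp [pvHexSpan]
  | cons p ps => simp [List.flatMap_cons, pvHexSpan]; decide

theorem pvHexSpan_zero_head (p : List Char) (h : pvHexSpan p = 0) :
    pvIsHex (p.headD ' ') = false ∨ p = [] := by
  cases p with
  | nil => right; rfl
  | cons c cs =>
    left
    simp only [pvHexSpan] at h
    by_cases hc : pvIsHex c = true
    · rw [if_pos hc] at h; omega
    · simpa using hc

theorem specNoQ_parts (ps : List (List Char)) (hps : ∀ p ∈ ps, '#' ∉ p) :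
    specNoQ (ps.flatMap (fun p => '#' :: p)) =
      (ps.map (fun p =>
        let n := pvHexSpan p
        if n ≠ 0 then (PySem.Int.toStr (pvHexVal (p.take n))).toList ++ p.drop n
        else '#' :: p)).flatten := by
  induction ps with
  | nil => simp [specNoQ]
  | cons p ps ih =>
    have hp : '#' ∉ p := hps p (List.mem_cons_self ..)
    have hps' : ∀ q ∈ ps, '#' ∉ q := fun q hq => hps q (List.mem_cons_of_mem _ hq)
    have htail0 : pvHexSpan (ps.flatMap (fun p => '#' :: p)) = 0 := pvHexSpan_flatMap_hash ps
    rw [List.flatMap_cons, List.map_cons, List.flatten_cons]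
    rw [List.cons_append, specNoQ]
    by_cases hn : pvHexSpan p = 0
    · -- no leading hex digits: condition is false
      have hhead : pvIsHex ((p ++ ps.flatMap (fun p => '#' :: p)).headD ' ') = false := by
        cases p with
        | nil =>
          simp only [List.nil_append]
          rcases pvHexSpan_zero_head _ htail0 with h2 | h2
          · exact h2
          · rw [h2]; decide
        | cons c cs =>
          rcases pvHexSpan_zero_head (c :: cs) hn with h | h
          · simpa using h
          · simp at h
      rw [if_neg (by intro hcc; exact absurd hcc.2 (by simp only [hhead]; simp))]
      rw [specNoQ_append_hashfree p _ hp, ih hps']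
      simp [hn]
    · -- leading hex digits: condition is true
      have hspan : pvHexSpan (p ++ ps.flatMap (fun p => '#' :: p)) = pvHexSpan p :=
        pvHexSpan_append_zero _ _ htail0
      obtain ⟨c, cs, rfl⟩ : ∃ c cs, p = c :: cs := by
        cases p with
        | nil => simp [pvHexSpan] at hn
        | cons c cs => exact ⟨c, cs, rfl⟩
      have hc : pvIsHex c = true := by
        cases hch : pvIsHex c
        · exfalso
          apply hn
          simp only [pvHexSpan]
          rw [if_neg (by simp [hch])]
        · rfl
      rw [if_pos (by simp [hc])]
      rw [hspan]
      have hle : pvHexSpan (c :: cs) ≤ (c :: cs).length := pvHexSpan_le _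
      rw [List.take_append_of_le_length hle, List.drop_append_of_le_length hle]
      have hdropfree : '#' ∉ (c :: cs).drop (pvHexSpan (c :: cs)) :=
        fun h => hp (List.mem_of_mem_drop h)
      rw [specNoQ_append_hashfree _ _ hdropfree, ih hps']
      simp [hn]

theorem pvSplitH_spec (cs : List Char) :
    ∃ p0 ps, pvSplitH cs = p0 :: ps ∧ cs = p0 ++ ps.flatMap (fun p => '#' :: p) ∧
      '#' ∉ p0 ∧ ∀ p ∈ ps, '#' ∉ p := by
  induction cs with
  | nil => exact ⟨[], [], rfl, by simp, by simp, by simp⟩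
  | cons c cs ih =>
    obtain ⟨p0, ps, heq, hdecomp, hp0, hps⟩ := ih
    by_cases hc : c = '#'
    · refine ⟨[], p0 :: ps, ?_, ?_, by simp, ?_⟩
      · simp [pvSplitH, heq, hc]
      · subst hc; simp [List.flatMap_cons, hdecomp]
      · intro p hp
        rcases List.mem_cons.mp hp with h | h
        · exact h ▸ hp0
        · exact hps p h
    · refine ⟨c :: p0, ps, ?_, by simp [hdecomp], ?_, hps⟩
      · simp [pvSplitH, heq, hc]
      · intro h
        rcases List.mem_cons.mp h with h | h
        · exact hc h.symm
        · exact hp0 h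

theorem pvConvSeg_eq (seg : List Char) : pvConvSeg seg = specNoQ seg := by
  obtain ⟨p0, ps, heq, hdecomp, hp0, hps⟩ := pvSplitH_spec seg
  rw [pvConvSeg, heq]
  conv_rhs => rw [hdecomp]
  rw [specNoQ_append_hashfree _ _ hp0, specNoQ_parts ps hps]

theorem specCHD_instring (q r : List Char) (hq : '"' ∉ q) :
    specCHD (q ++ r) true = q ++ specCHD r true := by
  induction q with
  | nil => simp
  | cons c cs ih =>
    have hc : c ≠ '"' := by intro h; exact hq (h ▸ List.mem_cons_self ..)
    have hcs : '"' ∉ cs := fun h => hq (List.mem_cons_of_mem _ h)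
    rw [List.cons_append, specCHD, if_neg hc, if_pos rfl, ih hcs]
    simp

theorem pvHexSpan_quoteRest (r : List Char) (hr : r = [] ∨ r.head? = some '"') :
    pvHexSpan r = 0 := by
  rcases hr with h | h
  · simp [h, pvHexSpan]
  · cases r with
    | nil => simp at h
    | cons c cs =>
      simp at h
      subst h
      simp [pvHexSpan]; decide

theorem specCHD_outstring (n : Nat) (seg r : List Char) (hlen : seg.length ≤ n)
    (hseg : '"' ∉ seg) (hr : r = [] ∨ r.head? = some '"') :
    specCHD (seg ++ r) false = specNoQ seg ++ specCHD r false := by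
  induction n generalizing seg with
  | zero =>
    have : seg = [] := List.eq_nil_of_length_eq_zero (by omega)
    simp [this, specNoQ]
  | succ n ih =>
    cases seg with
    | nil => simp [specNoQ]
    | cons c cs =>
      have hc : c ≠ '"' := by intro h; exact hseg (h ▸ List.mem_cons_self ..)
      have hcs : '"' ∉ cs := fun h => hseg (List.mem_cons_of_mem _ h)
      have hr0 : pvHexSpan r = 0 := pvHexSpan_quoteRest r hr
      have hhead : pvIsHex ((cs ++ r).headD ' ') = pvIsHex (cs.headD ' ') := by
        cases cs with
        | nil =>
          simp only [List.nil_append]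
          rcases pvHexSpan_zero_head r hr0 with h | h
          · rw [h]; decide
          · rw [h]
        | cons d ds => rfl
      rw [List.cons_append, specCHD, if_neg hc, if_neg (by simp)]
      rw [specNoQ]
      by_cases hcond : c = '#' ∧ pvIsHex (cs.headD ' ')
      · rw [if_pos ⟨hcond.1, by rw [hhead]; exact hcond.2⟩, if_pos hcond]
        have hspan : pvHexSpan (cs ++ r) = pvHexSpan cs := pvHexSpan_append_zero _ _ hr0
        have hle : pvHexSpan cs ≤ cs.length := pvHexSpan_le _
        rw [hspan, List.take_append_of_le_length hle, List.drop_append_of_le_length hle]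
        have hdfree : '"' ∉ cs.drop (pvHexSpan cs) := fun h => hcs (List.mem_of_mem_drop h)
        have hdlen : (cs.drop (pvHexSpan cs)).length ≤ n := by
          simp only [List.length_drop]
          simp only [List.length_cons] at hlen
          omega
        rw [ih _ hdlen hdfree]
        simp
      · rw [if_neg (by rw [hhead]; exact fun h => hcond (by simpa using h)),
            if_neg hcond]
        have hlen' : cs.length ≤ n := by simp at hlen; omega
        rw [ih _ hlen' hcs]
        simp

theorem pvBreakQ_none (cs p : List Char) (h : pvBreakQ cs = (p, none)) :
    cs = p ∧ '"' ∉ p := by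
  induction cs generalizing p with
  | nil =>
    simp [pvBreakQ] at h
    simp [h]
  | cons c cs ih =>
    by_cases hc : c = '"'
    · simp [pvBreakQ, hc] at h
    · simp only [pvBreakQ, if_neg hc] at h
      rcases hb : pvBreakQ cs with ⟨p', r'⟩
      rw [hb, Prod.mk.injEq] at h
      cases r' with
      | some r'' => exact absurd h.2 (by simp)
      | none =>
        obtain ⟨hcs, hfree⟩ := ih p' hb
        refine ⟨by rw [hcs, h.1], ?_⟩
        rw [← h.1]
        intro hmem
        rcases List.mem_cons.mp hmem with hh | hh
        · exact hc hh.symm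
        · exact hfree hh

theorem pvBreakQ_some (cs p r : List Char) (h : pvBreakQ cs = (p, some r)) :
    cs = p ++ '"' :: r ∧ '"' ∉ p := by
  induction cs generalizing p with
  | nil => simp [pvBreakQ] at h
  | cons c cs ih =>
    by_cases hc : c = '"'
    · simp [pvBreakQ, hc, Prod.mk.injEq] at h
      subst hc
      simp [h.1, ← h.2]
    · simp only [pvBreakQ, if_neg hc] at h
      rcases hb : pvBreakQ cs with ⟨p', r'⟩
      rw [hb, Prod.mk.injEq] at h
      cases r' with
      | none => exact absurd h.2 (by simp)
      | some r'' =>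
        have hr : r'' = r := by have := h.2; simpa using this
        subst hr
        obtain ⟨hcs, hfree⟩ := ih p' hb
        refine ⟨by rw [← h.1, hcs]; rfl, ?_⟩
        rw [← h.1]
        intro hmem
        rcases List.mem_cons.mp hmem with hh | hh
        · exact hc hh.symm
        · exact hfree hh

theorem pvConvAlt_eq_aux (n : Nat) (cs : List Char) (hn : cs.length ≤ n) :
    pvConvAlt cs = specCHD cs false := by
  induction n generalizing cs with
  | zero =>
    have hcs : cs = [] := List.eq_nil_of_length_eq_zero (by omega)
    subst hcs
    rw [pvConvAlt]
    simp [pvBreakQ, pvConvSeg, pvSplitH, specCHD]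
  | succ n ih =>
   rw [pvConvAlt]
   split
   · rename_i before h1
     obtain ⟨h0, hfree⟩ := pvBreakQ_none cs before h1
     rw [h0]
     have := specCHD_outstring before.length before [] le_rfl hfree (Or.inl rfl)
     simp only [List.append_nil] at this
     rw [this, pvConvSeg_eq]
     simp [specCHD]
   · rename_i before rest h1
     obtain ⟨h0, hfreeb⟩ := pvBreakQ_some cs before rest h1
     rw [h0]
     split
     · rename_i inside h2
       obtain ⟨h0', hfreei⟩ := pvBreakQ_none rest inside h2
       rw [h0']
       rw [specCHD_outstring before.length before _ le_rfl hfreeb (Or.inr rfl)]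
       rw [pvConvSeg_eq]
       rw [specCHD, if_pos rfl]
       simp only [Bool.not_false]
       have := specCHD_instring inside [] hfreei
       simp only [List.append_nil] at this
       rw [this]
       simp [specCHD]
     · rename_i inside after h2
       obtain ⟨h0', hfreei⟩ := pvBreakQ_some rest inside after h2
       rw [h0']
       rw [specCHD_outstring before.length before _ le_rfl hfreeb (Or.inr rfl)]
       rw [pvConvSeg_eq]
       rw [specCHD, if_pos rfl]
       simp only [Bool.not_false]
       rw [specCHD_instring inside ('"' :: after) hfreei]
       rw [specCHD, if_pos rfl]
       have hlen : after.length ≤ n := by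
         have l0 := congrArg List.length h0
         have l1 := congrArg List.length h0'
         simp at l0 l1
         omega
       rw [ih after hlen]
       simp

theorem pvConvAlt_eq (cs : List Char) : pvConvAlt cs = specCHD cs false :=
  pvConvAlt_eq_aux cs.length cs le_rfl

theorem pvLoopA_eq (n : Nat) (cs : List Char) (i : Nat) (b : Bool) (res : List (List Char))
    (hn : cs.length - i ≤ n) :
    (pvLoopA cs i b res).flatten = res.flatten ++ specCHD (cs.drop i) b := by
  induction n generalizing i b res with
  | zero =>
    have hge : ¬ i < cs.length := by omega
    rw [pvLoopA, dif_neg hge]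
    have : cs.drop i = [] := List.drop_eq_nil_of_le (by omega)
    simp [this, specCHD]
  | succ n ih =>
    rw [pvLoopA]
    split
    · rename_i h
      rw [List.drop_eq_getElem_cons h, specCHD]
      by_cases hq : cs[i] = '"'
      · rw [if_pos hq, if_pos hq, ih (i + 1) (!b) _ (by omega)]
        simp [hq]
      · rw [if_neg hq, if_neg hq]
        by_cases hb : b
        · rw [if_pos hb, if_pos hb, ih (i + 1) b _ (by omega)]
          simp
        · rw [if_neg hb, if_neg hb]
          have hhead : (cs.drop (i + 1)).headD ' ' = cs[i + 1]?.getD ' ' := by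
            rw [List.headD_eq_head?_getD, List.head?_drop]
          by_cases hcond : cs[i] = '#' ∧ i + 1 < cs.length ∧ pvIsHex (cs[i + 1]?.getD ' ')
          · rw [if_pos hcond]
            have hcond' : cs[i] = '#' ∧ pvIsHex ((cs.drop (i + 1)).headD ' ') := by
              rw [hhead]; exact ⟨hcond.1, hcond.2.2⟩
            rw [if_pos hcond']
            have hj : pvHexEndA cs (i + 1) = i + 1 + pvHexSpan (cs.drop (i + 1)) :=
              pvHexEndA_eq cs (i + 1) (by omega)
            have hspan1 : 1 ≤ pvHexSpan (cs.drop (i + 1)) := by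
              have h1 : i + 1 < cs.length := hcond.2.1
              rw [List.drop_eq_getElem_cons h1]
              simp only [pvHexSpan]
              rw [if_pos ?_]
              · omega
              · have := hcond.2.2
                rwa [List.getElem?_eq_getElem h1] at this
            rw [ih _ b _ ?_]
            · rw [hj]
              have : i + 1 + pvHexSpan (cs.drop (i + 1)) - (i + 1) = pvHexSpan (cs.drop (i + 1)) := by omega
              rw [this]
              have hdd : cs.drop (i + 1 + pvHexSpan (cs.drop (i + 1))) =
                  (cs.drop (i + 1)).drop (pvHexSpan (cs.drop (i + 1))) := by
                rw [List.drop_drop]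
              rw [hdd]
              simp
            · rw [hj]
              omega
          · rw [if_neg hcond]
            have hcond2 : ¬ (cs[i] = '#' ∧ pvIsHex ((cs.drop (i + 1)).headD ' ')) := by
              rw [hhead]
              intro hh
              apply hcond
              refine ⟨hh.1, ?_, hh.2⟩
              by_contra hge
              have : cs[i + 1]? = none := by
                rw [List.getElem?_eq_none]
                omega
              rw [this] at hh
              exact absurd hh.2 (by decide)
            rw [if_neg hcond2, ih (i + 1) b _ (by omega)]
            simp
    · rename_i h
      have : cs.drop i = [] := List.drop_eq_nil_of_le (by omega)
      simp [this, specCHD]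

-- ===== VERDICT (by name: the statement is the Claim_ definition above) =====
theorem convert_hex_to_decimal_spec : Claim_equal_convert_hex_to_decimal := by
  intro line _
  unfold Spec_convert_hex_to_decimal convert_hex_to_decimal convert_hex_to_decimal_alt
  rw [pvConvAlt_eq]
  rw [pvLoopA_eq line.toList.length line.toList 0 false [] (by omega)]
  simp
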